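-- pv_equiv track=rewrite | github.com/Astro-Engine/Astro_Engine_ORGNL | astro_engine/engine/yogas/RareYogas.py | is_planet_functionally_benefic
-- ===== SOURCE A (Python) =====
-- signs = ['Aries', 'Taurus', 'Gemini', 'Cancer', 'Leo', 'Virgo',
--          'Libra', 'Scorpio', 'Sagittarius', 'Capricorn', 'Aquarius', 'Pisces']
--
-- sign_rulers = {
--     'Aries': 'Mars', 'Taurus': 'Venus', 'Gemini': 'Mercury', 'Cancer': 'Moon',
--     'Leo': 'Sun', 'Virgo': 'Mercury', 'Libra': 'Venus', 'Scorpio': 'Mars',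
--     'Sagittarius': 'Jupiter', 'Capricorn': 'Saturn', 'Aquarius': 'Saturn', 'Pisces': 'Jupiter'
-- }
--
-- natural_benefics = ['Moon', 'Mercury', 'Jupiter', 'Venus']
--
-- def get_house_lord(house_number, asc_sign_index):
--     """Get the ruling planet of a house based on Whole Sign system."""
--     house_sign_index = (asc_sign_index + house_number - 1) % 12
--     house_sign = signs[house_sign_index]
--     return sign_rulers[house_sign]
--
-- def is_planet_functionally_benefic(planet, asc_sign_index):
--     """Check if planet is functionally benefic for given ascendant."""
--     ruled_houses = []
--     for house_num in range(1, 13):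
--         house_lord = get_house_lord(house_num, asc_sign_index)
--         if house_lord == planet:
--             ruled_houses.append(house_num)
--
--     trikona_lord = any(house in [1, 5, 9] for house in ruled_houses)
--     dusthana_lord = any(house in [6, 8, 12] for house in ruled_houses)
--     kendra_lord = any(house in [4, 7, 10] for house in ruled_houses)
--
--     if trikona_lord and not dusthana_lord:
--         return True
--     elif dusthana_lord:
--         return False
--     elif planet in natural_benefics and not kendra_lord:
--         return True
--     else:
--         return False
-- ===== SOURCE B (Python) =====
-- # B: no scan over houses or signs at all — a constant inverse-rulership table maps the
-- # planet directly to the (at most two) zodiac sign indices it rules; each is converted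
-- # to a whole-sign house number by (i - asc) % 12 + 1 and the same category tests decide.
-- RULED_SIGN_INDICES = {
--     'Mars': [0, 7], 'Venus': [1, 6], 'Mercury': [2, 5], 'Moon': [3],
--     'Sun': [4], 'Jupiter': [8, 11], 'Saturn': [9, 10],
-- }
--
-- NATURAL_BENEFICS = ('Moon', 'Mercury', 'Jupiter', 'Venus')
--
-- def is_planet_functionally_benefic(planet, asc_sign_index):
--     """Check if planet is functionally benefic for given ascendant."""
--     houses = [(i - asc_sign_index) % 12 + 1
--               for i in RULED_SIGN_INDICES.get(planet, [])]
--     if any(h in (6, 8, 12) for h in houses):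
--         return False
--     if any(h in (1, 5, 9) for h in houses):
--         return True
--     return planet in NATURAL_BENEFICS and all(h not in (4, 7, 10) for h in houses)
-- ===== Notes on version B (the rewrite author's own statement) =====
-- stated objective: alternative
-- what changed: B removes the 12-house scan entirely: a constant inverse-rulership table maps the planet straight to the at-most-two sign indices it rules, each converted to a house via (i - asc) % 12 + 1, with the decision tree reordered (dusthana first, then trikona, then the benefic/kendra check).
import Mathlib
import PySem

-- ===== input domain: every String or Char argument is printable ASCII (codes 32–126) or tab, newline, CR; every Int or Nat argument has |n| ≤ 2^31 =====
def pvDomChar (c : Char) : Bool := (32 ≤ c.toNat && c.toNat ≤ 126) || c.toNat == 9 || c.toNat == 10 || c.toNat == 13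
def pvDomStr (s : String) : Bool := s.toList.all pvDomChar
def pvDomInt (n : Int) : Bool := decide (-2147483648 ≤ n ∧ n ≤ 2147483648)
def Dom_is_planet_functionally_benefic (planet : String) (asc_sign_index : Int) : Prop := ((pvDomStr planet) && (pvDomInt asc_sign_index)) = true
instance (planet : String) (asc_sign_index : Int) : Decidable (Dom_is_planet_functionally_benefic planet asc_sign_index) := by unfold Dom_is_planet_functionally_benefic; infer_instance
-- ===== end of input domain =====

-- B replaces A's 12-house scan by a constant inverse-rulership table: the planet is looked up
-- directly to the (at most two) sign indices it rules, each converted to a house number by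
-- (i - asc) % 12 + 1; same category tests, decision tree reordered (dusthana first).

-- ===== PORT A =====
def pvSigns : List String :=
  ["Aries", "Taurus", "Gemini", "Cancer", "Leo", "Virgo",
   "Libra", "Scorpio", "Sagittarius", "Capricorn", "Aquarius", "Pisces"]

def pvSignRulers : PySem.Dict String String := PySem.Dict.ofList
  [("Aries", "Mars"), ("Taurus", "Venus"), ("Gemini", "Mercury"), ("Cancer", "Moon"),
   ("Leo", "Sun"), ("Virgo", "Mercury"), ("Libra", "Venus"), ("Scorpio", "Mars"),
   ("Sagittarius", "Jupiter"), ("Capricorn", "Saturn"), ("Aquarius", "Saturn"), ("Pisces", "Jupiter")]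

def pvNaturalBenefics : List String := ["Moon", "Mercury", "Jupiter", "Venus"]

def get_house_lord (house_number : Int) (asc_sign_index : Int) : String :=
  let house_sign_index := PySem.Int.mod (asc_sign_index + house_number - 1) 12
  -- index is always in [0,12) and the key always present, so the defaults are never taken: exact
  let house_sign := (PySem.List.pyGet? pvSigns house_sign_index).getD ""
  (PySem.Dict.get? pvSignRulers house_sign).getD ""

def is_planet_functionally_benefic (planet : String) (asc_sign_index : Int) : Bool :=
  let ruled_houses := (PySem.List.pyRange 1 13 1).foldl
    (fun acc house_num =>
      if get_house_lord house_num asc_sign_index == planet then acc ++ [house_num] else acc)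
    ([] : List Int)
  let trikona_lord := ruled_houses.any (fun h => [(1 : Int), 5, 9].contains h)
  let dusthana_lord := ruled_houses.any (fun h => [(6 : Int), 8, 12].contains h)
  let kendra_lord := ruled_houses.any (fun h => [(4 : Int), 7, 10].contains h)
  if trikona_lord && !dusthana_lord then true
  else if dusthana_lord then false
  else if pvNaturalBenefics.contains planet && !kendra_lord then true
  else false

-- ===== PORT B =====
def pvRuledSignIndices : PySem.Dict String (List Int) := PySem.Dict.ofList
  [("Mars", [0, 7]), ("Venus", [1, 6]), ("Mercury", [2, 5]), ("Moon", [3]),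
   ("Sun", [4]), ("Jupiter", [8, 11]), ("Saturn", [9, 10])]

def pvNaturalBeneficsB : List String := ["Moon", "Mercury", "Jupiter", "Venus"]

def is_planet_functionally_benefic_alt (planet : String) (asc_sign_index : Int) : Bool :=
  let houses := ((PySem.Dict.get? pvRuledSignIndices planet).getD []).map
    (fun i => PySem.Int.mod (i - asc_sign_index) 12 + 1)
  if houses.any (fun h => [(6 : Int), 8, 12].contains h) then false
  else if houses.any (fun h => [(1 : Int), 5, 9].contains h) then true
  else pvNaturalBeneficsB.contains planet && houses.all (fun h => !([(4 : Int), 7, 10].contains h))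

-- ===== PRECONDITION & SPEC =====
def Spec_is_planet_functionally_benefic (planet : String) (asc_sign_index : Int) (out : Bool) : Prop := out = is_planet_functionally_benefic_alt planet asc_sign_index
instance (planet : String) (asc_sign_index : Int) (out : Bool) : Decidable (Spec_is_planet_functionally_benefic planet asc_sign_index out) := by unfold Spec_is_planet_functionally_benefic; infer_instance

-- ===== CLAIM (what is proved, stated in full; the proofs are below) =====
def Claim_equal_is_planet_functionally_benefic : Prop := ∀ (planet : String) (asc_sign_index : Int), Dom_is_planet_functionally_benefic planet asc_sign_index → Spec_is_planet_functionally_benefic planet asc_sign_index (is_planet_functionally_benefic planet asc_sign_index)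

-- ===== LEMMAS AND PROOFS =====

lemma ghl_congr {a b : Int} (hab : PySem.Int.mod a 12 = PySem.Int.mod b 12) (h : Int) :
    get_house_lord h a = get_house_lord h b := by
  unfold get_house_lord
  have : PySem.Int.mod (a + h - 1) 12 = PySem.Int.mod (b + h - 1) 12 := by
    have h12 : (0 : Int) < 12 := by norm_num
    simp only [PySem.Int.mod_eq_emod_of_pos h12] at hab ⊢
    omega
  rw [this]

lemma bmod_congr {a b : Int} (hab : PySem.Int.mod a 12 = PySem.Int.mod b 12) (s : Int) :
    PySem.Int.mod (s - a) 12 = PySem.Int.mod (s - b) 12 := by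
  have h12 : (0 : Int) < 12 := by norm_num
  simp only [PySem.Int.mod_eq_emod_of_pos h12] at hab ⊢
  omega

lemma A_congr (p : String) {a b : Int} (hab : PySem.Int.mod a 12 = PySem.Int.mod b 12) :
    is_planet_functionally_benefic p a = is_planet_functionally_benefic p b := by
  unfold is_planet_functionally_benefic
  simp only [ghl_congr hab]

lemma B_congr (p : String) {a b : Int} (hab : PySem.Int.mod a 12 = PySem.Int.mod b 12) :
    is_planet_functionally_benefic_alt p a = is_planet_functionally_benefic_alt p b := by
  unfold is_planet_functionally_benefic_alt
  simp only [bmod_congr hab]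

lemma pclass (p : String) :
    p = "Mars" ∨ p = "Venus" ∨ p = "Mercury" ∨ p = "Moon" ∨ p = "Sun" ∨ p = "Jupiter" ∨ p = "Saturn" ∨
    (p ≠ "Mars" ∧ p ≠ "Venus" ∧ p ≠ "Mercury" ∧ p ≠ "Moon" ∧ p ≠ "Sun" ∧ p ≠ "Jupiter" ∧ p ≠ "Saturn") := by
  by_cases h1 : p = "Mars" <;> by_cases h2 : p = "Venus" <;> by_cases h3 : p = "Mercury" <;>
    by_cases h4 : p = "Moon" <;> by_cases h5 : p = "Sun" <;> by_cases h6 : p = "Jupiter" <;>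
    by_cases h7 : p = "Saturn" <;> tauto

lemma ghl_mem (h asc : Int) :
    get_house_lord h asc ∈ (["Mars", "Venus", "Mercury", "Moon", "Sun", "Jupiter", "Saturn"] : List String) := by
  unfold get_house_lord
  have h12 : (0 : Int) < 12 := by norm_num
  have h0 := PySem.Int.mod_nonneg (asc + h - 1) h12
  have h1 := PySem.Int.mod_lt (asc + h - 1) h12
  set i := PySem.Int.mod (asc + h - 1) 12 with hi
  clear_value i
  interval_cases i <;> decide

lemma A_false (planet : String) (asc : Int)
    (n1 : planet ≠ "Mars") (n2 : planet ≠ "Venus") (n3 : planet ≠ "Mercury") (n4 : planet ≠ "Moon")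
    (n5 : planet ≠ "Sun") (n6 : planet ≠ "Jupiter") (n7 : planet ≠ "Saturn") :
    is_planet_functionally_benefic planet asc = false := by
  unfold is_planet_functionally_benefic
  have hc : ∀ hn : Int, (get_house_lord hn asc == planet) = false := by
    intro hn
    have hm := ghl_mem hn asc
    apply beq_eq_false_iff_ne.mpr
    simp only [List.mem_cons, List.not_mem_nil, or_false] at hm
    rcases hm with e|e|e|e|e|e|e <;> rw [e] <;> exact fun q => absurd q.symm (by assumption)
  rw [PySem.List.foldl_append_if_eq_filter]
  simp [hc, pvNaturalBenefics, n2, n3, n4, n6]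

lemma B_false (planet : String) (asc : Int)
    (n2 : planet ≠ "Venus") (n3 : planet ≠ "Mercury") (n4 : planet ≠ "Moon") (n6 : planet ≠ "Jupiter")
    (hnone : PySem.Dict.get? pvRuledSignIndices planet = none) :
    is_planet_functionally_benefic_alt planet asc = false := by
  unfold is_planet_functionally_benefic_alt
  rw [hnone]
  simp [pvNaturalBeneficsB, n2, n3, n4, n6]

lemma ruled_none (planet : String)
    (n1 : planet ≠ "Mars") (n2 : planet ≠ "Venus") (n3 : planet ≠ "Mercury") (n4 : planet ≠ "Moon")
    (n5 : planet ≠ "Sun") (n6 : planet ≠ "Jupiter") (n7 : planet ≠ "Saturn") :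
    PySem.Dict.get? pvRuledSignIndices planet = none := by
  have b1 : ("Mars" == planet) = false := beq_eq_false_iff_ne.mpr fun q => n1 q.symm
  have b2 : ("Venus" == planet) = false := beq_eq_false_iff_ne.mpr fun q => n2 q.symm
  have b3 : ("Mercury" == planet) = false := beq_eq_false_iff_ne.mpr fun q => n3 q.symm
  have b4 : ("Moon" == planet) = false := beq_eq_false_iff_ne.mpr fun q => n4 q.symm
  have b5 : ("Sun" == planet) = false := beq_eq_false_iff_ne.mpr fun q => n5 q.symm
  have b6 : ("Jupiter" == planet) = false := beq_eq_false_iff_ne.mpr fun q => n6 q.symm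
  have b7 : ("Saturn" == planet) = false := beq_eq_false_iff_ne.mpr fun q => n7 q.symm
  have hmk : pvRuledSignIndices = PySem.Dict.mk
      [("Mars", [0, 7]), ("Venus", [1, 6]), ("Mercury", [2, 5]), ("Moon", [3]),
       ("Sun", [4]), ("Jupiter", [8, 11]), ("Saturn", [9, 10])] := by decide
  rw [hmk]
  simp [PySem.Dict.get?_mk_cons, b1, b2, b3, b4, b5, b6, b7, PySem.Dict.get?]

-- ===== VERDICT (by name: the statement is the Claim_ definition above) =====
theorem is_planet_functionally_benefic_spec : Claim_equal_is_planet_functionally_benefic := by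
  intro planet asc _
  unfold Spec_is_planet_functionally_benefic
  have h12 : (0 : Int) < 12 := by norm_num
  have hid : PySem.Int.mod asc 12 = PySem.Int.mod (PySem.Int.mod asc 12) 12 := by
    simp only [PySem.Int.mod_eq_emod_of_pos h12]
    omega
  have hm0 : 0 ≤ PySem.Int.mod asc 12 := PySem.Int.mod_nonneg asc h12
  have hm1 : PySem.Int.mod asc 12 < 12 := PySem.Int.mod_lt asc h12
  rcases pclass planet with h|h|h|h|h|h|h|h
  all_goals first
    | (obtain ⟨n1, n2, n3, n4, n5, n6, n7⟩ := h
       exact (A_false planet asc n1 n2 n3 n4 n5 n6 n7).trans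
         (B_false planet asc n2 n3 n4 n6 (ruled_none planet n1 n2 n3 n4 n5 n6 n7)).symm)
    | (subst h
       rw [A_congr _ hid, B_congr _ hid]
       set m := PySem.Int.mod asc 12 with hm
       clear_value m
       interval_cases m <;> decide)
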